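-- pv_equiv track=rewrite | github.com/wisaac407/blender-logging-console | console_logging.py | get_word_span
-- ===== SOURCE A (Python) =====
-- def get_word_span(line, current_pos):
--     word = ''
--     begidx = 0
--     endidx = 0
--
--     # Add a space at the end of the line to force to set the endidx if needed
--     for i, c in enumerate(line + ' '):
--         if c == ' ':
--             endidx = i
--
--             if i >= current_pos:
--                 break
--             word = ''
--             begidx = i + 1
--         else:
--             word += c
--
--     return begidx, endidx
-- ===== SOURCE B (Python) =====
-- def get_word_span(line, current_pos):
--     ext = line + ' '
--     begidx = ext.rfind(' ', 0, max(current_pos, 0)) + 1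
--     endidx = ext.find(' ', min(max(current_pos, 0), len(line)))
--     return begidx, endidx
-- ===== Notes on version B (the rewrite author's own statement) =====
-- stated objective: simpler
-- what changed: Replaces the single accumulating forward scan with break by two independent directional searches on line+' ': a backward rfind for the last space before the (clamped) cursor and a forward find for the first space at/after it.
import Mathlib
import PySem

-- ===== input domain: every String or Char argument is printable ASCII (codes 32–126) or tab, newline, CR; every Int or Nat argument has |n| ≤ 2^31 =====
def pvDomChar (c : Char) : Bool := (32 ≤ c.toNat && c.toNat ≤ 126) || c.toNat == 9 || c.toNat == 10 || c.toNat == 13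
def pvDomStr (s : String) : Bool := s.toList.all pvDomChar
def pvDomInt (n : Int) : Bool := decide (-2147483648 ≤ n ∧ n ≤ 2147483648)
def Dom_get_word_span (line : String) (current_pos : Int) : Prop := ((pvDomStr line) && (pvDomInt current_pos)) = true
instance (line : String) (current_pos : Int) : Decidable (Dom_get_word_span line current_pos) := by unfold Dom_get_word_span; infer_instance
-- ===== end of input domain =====

-- B replaces A's single accumulating forward scan (with break) by two independent
-- directional searches (rfind / find) on line + ' '; objective: simpler.

-- ===== PORT A =====
-- the for-loop over enumerate(line + ' ') with break, carrying (word, begidx, endidx)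
def gwsLoop : List Char → Nat → String → Int → Int → Int → Int × Int
  | [], _, _, begidx, endidx, _ => (begidx, endidx)
  | c :: rest, i, word, begidx, endidx, cp =>
    if c = ' ' then
      -- endidx = i; if i >= current_pos: break
      if cp ≤ (i : Int) then (begidx, (i : Int))
      else gwsLoop rest (i + 1) "" ((i : Int) + 1) (i : Int) cp
    else gwsLoop rest (i + 1) (word.push c) begidx endidx cp

def get_word_span (line : String) (current_pos : Int) : Int × Int :=
  gwsLoop (line.toList ++ [' ']) 0 "" 0 0 current_pos

-- ===== PORT B =====
-- ext.find(' ', s): first index i ≥ s with ext[i] = ' ', else -1 (exact port of str.find for a 1-char needle)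
def findSpaceAux : List Char → Nat → Nat → Int
  | [], _, _ => -1
  | c :: rest, i, s => if s ≤ i ∧ c = ' ' then (i : Int) else findSpaceAux rest (i + 1) s

-- ext.rfind(' ', 0, t): last index i < t with ext[i] = ' ', else -1 (exact port of str.rfind for a 1-char needle)
def rfindSpaceAux : List Char → Nat → Nat → Int → Int
  | [], _, _, acc => acc
  | c :: rest, i, t, acc => rfindSpaceAux rest (i + 1) t (if i < t ∧ c = ' ' then (i : Int) else acc)

def get_word_span_alt (line : String) (current_pos : Int) : Int × Int :=
  let ext := line.toList ++ [' ']
  let begidx := rfindSpaceAux ext 0 (max current_pos 0).toNat (-1) + 1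
  let endidx := findSpaceAux ext 0 (min (max current_pos 0) (line.toList.length : Int)).toNat
  (begidx, endidx)

-- ===== PRECONDITION & SPEC =====
def Spec_get_word_span (line : String) (current_pos : Int) (out : Int × Int) : Prop := out = get_word_span_alt line current_pos
instance (line : String) (current_pos : Int) (out : Int × Int) : Decidable (Spec_get_word_span line current_pos out) := by unfold Spec_get_word_span; infer_instance

-- ===== CLAIM (what is proved, stated in full; the proofs are below) =====
def Claim_equal_get_word_span : Prop := ∀ (line : String) (current_pos : Int), Dom_get_word_span line current_pos → Spec_get_word_span line current_pos (get_word_span line current_pos)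

-- ===== LEMMAS AND PROOFS =====

-- rfind over a region whose indices are all ≥ the stop bound leaves the accumulator unchanged
theorem rfindSpaceAux_noop (l : List Char) (i t : Nat) (acc : Int) (h : t ≤ i) :
    rfindSpaceAux l i t acc = acc := by
  induction l generalizing i acc with
  | nil => rfl
  | cons c rest ih =>
      simp only [rfindSpaceAux]
      rw [if_neg (by omega : ¬ (i < t ∧ c = ' '))]
      exact ih (i + 1) acc (by omega)

-- Main invariant: on a suffix l ++ [' '] starting at index i, A's loop returns exactly
-- B's (rfind + 1, find), provided the find-start s agrees with cp on all indices of l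
-- and s reaches the final appended space, and the rfind-stop t agrees with cp everywhere.
theorem gwsLoop_eq (cp : Int) (s t : Nat)
    (Ht : ∀ j : Nat, j < t ↔ (j : Int) < cp) :
    ∀ (l : List Char) (i : Nat) (word : String) (b e : Int),
      (∀ j : Nat, i ≤ j → j < i + l.length → (s ≤ j ↔ cp ≤ (j : Int))) →
      s ≤ i + l.length →
      gwsLoop (l ++ [' ']) i word b e cp =
        (rfindSpaceAux (l ++ [' ']) i t (b - 1) + 1, findSpaceAux (l ++ [' ']) i s) := by
  intro l
  induction l with
  | nil =>
      intro i word b e _ Hlast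
      have h1 := Ht i
      simp only [List.length_nil, Nat.add_zero] at Hlast
      simp only [List.nil_append, gwsLoop, rfindSpaceAux, findSpaceAux]
      norm_num
      split_ifs <;> simp only [Prod.mk.injEq, and_true] <;> omega
  | cons c rest ih =>
      intro i word b e Hs Hlast
      simp only [List.length_cons] at Hs Hlast
      have hsi := Hs i (le_refl i) (by omega)
      have hti := Ht i
      by_cases hc : c = ' '
      · simp only [List.cons_append, gwsLoop, rfindSpaceAux, findSpaceAux, hc,
          and_true, if_true]
        by_cases hbr : cp ≤ (i : Int)
        · have h1 : ¬ i < t := by omega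
          have h2 : t ≤ i + 1 := by omega
          have h3 : s ≤ i := by omega
          rw [if_pos hbr, if_neg h1, rfindSpaceAux_noop (rest ++ [' ']) (i + 1) t (b - 1) h2, if_pos h3]
          simp only [Prod.mk.injEq, and_true]; omega
        · rw [if_neg hbr, if_pos (by omega : i < t), if_neg (by omega : ¬ s ≤ i),
            ih (i + 1) "" ((i : Int) + 1) (i : Int)
              (fun j hj1 hj2 => Hs j (by omega) (by omega)) (by omega)]
          norm_num
      · simp only [List.cons_append, gwsLoop, rfindSpaceAux, findSpaceAux,
          if_neg hc, if_neg (fun (h : i < t ∧ c = ' ') => hc h.2), if_neg (fun (h : s ≤ i ∧ c = ' ') => hc h.2)]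
        exact ih (i + 1) (word.push c) b e
          (fun j hj1 hj2 => Hs j (by omega) (by omega)) (by omega)

-- ===== VERDICT (by name: the statement is the Claim_ definition above) =====
theorem get_word_span_spec : Claim_equal_get_word_span := by
  intro line cp _
  unfold Spec_get_word_span get_word_span get_word_span_alt
  set L := line.toList with hL
  set n := L.length with hn
  set s := (min (max cp 0) (n : Int)).toNat with hs
  set t := (max cp 0).toNat with ht
  have Ht : ∀ j : Nat, j < t ↔ (j : Int) < cp := by intro j; omega
  have Hs : ∀ j : Nat, 0 ≤ j → j < 0 + L.length → (s ≤ j ↔ cp ≤ (j : Int)) := by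
    intro j _ hj; simp only [Nat.zero_add] at hj
    constructor <;> intro h <;> omega
  have Hlast : s ≤ 0 + L.length := by omega
  have := gwsLoop_eq cp s t Ht L 0 "" 0 0 Hs Hlast
  rw [this]
  norm_num
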